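-- pv_equiv track=rewrite | github.com/pypi-data/pypi-mirror-127 | packages/CQHDimensionalPhenotyper/CQHDimensionalPhenotyper-0.1.3-py2-none-any.whl/CQHDimensionalPhenotyper/CQHDimensionalPhenotyper.py | count_terms
-- ===== SOURCE A (Python) =====
-- def count_terms(bigrams, to_count):
--     counts = {term: 0 for term in to_count}
--     for a, b in bigrams:
--         if a in counts:
--             counts[a] += 1
--         bi_key = "_".join((a, b))
--         if bi_key in counts:
--             counts[bi_key] += 1
--     counts['len'] = len(bigrams)
--     return counts
-- ===== SOURCE B (Python) =====
-- def count_terms(bigrams, to_count):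
--     counts = {}
--     for term in to_count:
--         as_unigram = sum(1 for a, b in bigrams if a == term)
--         as_bigram = sum(1 for a, b in bigrams if a + "_" + b == term)
--         counts[term] = as_unigram + as_bigram
--     counts['len'] = len(bigrams)
--     return counts
-- ===== Notes on version B (the rewrite author's own statement) =====
-- stated objective: alternative
-- what changed: B builds no frequency table at all: for each requested term it directly counts matching head words and matching joined bigram keys by scanning the bigram list, trading A's single dict-updating pass for per-term scans (O(n*m) instead of O(n+m)).
import Mathlib
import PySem

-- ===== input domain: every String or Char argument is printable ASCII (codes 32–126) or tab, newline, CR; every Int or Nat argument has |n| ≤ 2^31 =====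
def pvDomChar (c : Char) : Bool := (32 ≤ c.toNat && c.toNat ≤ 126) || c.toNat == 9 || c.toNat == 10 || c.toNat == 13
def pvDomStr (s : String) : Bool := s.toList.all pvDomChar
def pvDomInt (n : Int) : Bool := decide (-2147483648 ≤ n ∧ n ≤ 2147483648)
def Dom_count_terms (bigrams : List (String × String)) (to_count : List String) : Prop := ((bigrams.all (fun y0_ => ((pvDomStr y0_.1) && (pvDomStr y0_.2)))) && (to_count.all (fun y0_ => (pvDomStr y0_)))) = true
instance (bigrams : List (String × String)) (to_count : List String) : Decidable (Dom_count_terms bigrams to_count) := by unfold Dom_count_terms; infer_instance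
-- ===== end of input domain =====

-- B builds no frequency table: for each requested term it counts matching head words and
-- matching joined bigram keys by direct scans of the bigram list (alternative decomposition).

-- ===== PORT A =====
-- one guarded pass over a dict pre-initialized from to_count
def count_terms (bigrams : List (String × String)) (to_count : List String) : List (String × Int) :=
  let counts : PySem.Dict String Int := to_count.foldl (fun d term => d.insert term 0) PySem.Dict.empty
  let counts := bigrams.foldl (fun d p =>
    let d := if d.contains p.1 then d.modify p.1 0 (· + 1) else d
    let bi_key := PySem.Str.join "_" [p.1, p.2]
    if d.contains bi_key then d.modify bi_key 0 (· + 1) else d) counts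
  (counts.insert "len" (bigrams.length : Int)).items

-- ===== PORT B =====
-- per requested term: count bigrams whose head equals it, plus those whose joined key equals it
def count_terms_alt (bigrams : List (String × String)) (to_count : List String) : List (String × Int) :=
  let counts : PySem.Dict String Int := to_count.foldl (fun d term =>
    let as_unigram : Int := ((bigrams.filter (fun p => p.1 == term)).length : Int)
    let as_bigram : Int := ((bigrams.filter (fun p => p.1 ++ "_" ++ p.2 == term)).length : Int)
    d.insert term (as_unigram + as_bigram)) PySem.Dict.empty
  (counts.insert "len" (bigrams.length : Int)).items

-- ===== PRECONDITION & SPEC =====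
def Spec_count_terms (bigrams : List (String × String)) (to_count : List String) (out : List (String × Int)) : Prop := out = count_terms_alt bigrams to_count
instance (bigrams : List (String × String)) (to_count : List String) (out : List (String × Int)) : Decidable (Spec_count_terms bigrams to_count out) := by unfold Spec_count_terms; infer_instance

-- ===== CLAIM (what is proved, stated in full; the proofs are below) =====
def Claim_equal_count_terms : Prop := ∀ (bigrams : List (String × String)) (to_count : List String), Dom_count_terms bigrams to_count → Spec_count_terms bigrams to_count (count_terms bigrams to_count)

-- ===== LEMMAS AND PROOFS =====

-- The two per-bigram events A may count
def pvEvents (l : List (String × String)) : List String :=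
  l.flatMap (fun p => [p.1, PySem.Str.join "_" [p.1, p.2]])

-- A's loop body, named for the lemmas (defeq to the port's lambda)
def pvStepA (d : PySem.Dict String Int) (p : String × String) : PySem.Dict String Int :=
  let d := if d.contains p.1 then d.modify p.1 0 (· + 1) else d
  let bi_key := PySem.Str.join "_" [p.1, p.2]
  if d.contains bi_key then d.modify bi_key 0 (· + 1) else d

-- one guarded increment: keys, contains, and getD at a present key
lemma contains_guard (d : PySem.Dict String Int) (t k : String) :
    (if d.contains t then d.modify t 0 (· + 1) else d).contains k = d.contains k := by
  split_ifs with hc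
  · rw [PySem.Dict.contains_modify]
    by_cases he : k = t
    · subst he; simp [hc]
    · simp [he]
  · rfl

lemma keys_guard (d : PySem.Dict String Int) (t : String) :
    (if d.contains t then d.modify t 0 (· + 1) else d).keys = d.keys := by
  split_ifs with hc
  · rw [PySem.Dict.keys_modify, PySem.Dict.keys_insert_of_contains _ _ hc]
  · rfl

lemma getD_guard (d : PySem.Dict String Int) (t k : String) (h : d.contains k = true) :
    (if d.contains t then d.modify t 0 (· + 1) else d).getD k 0
      = d.getD k 0 + (if t = k then 1 else 0) := by
  by_cases he : t = k
  · subst he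
    rw [if_pos h, if_pos rfl]
    simp [PySem.Dict.getD_modify_self]
  · rw [if_neg he]
    split_ifs with hc <;> simp [PySem.Dict.getD_modify_of_ne _ _ _ (Ne.symm he)]

lemma contains_stepA (d : PySem.Dict String Int) (p : String × String) (k : String) :
    (pvStepA d p).contains k = d.contains k := by
  unfold pvStepA
  rw [contains_guard, contains_guard]

lemma keys_stepA (d : PySem.Dict String Int) (p : String × String) :
    (pvStepA d p).keys = d.keys := by
  unfold pvStepA
  rw [keys_guard, keys_guard]

lemma keys_Aloop (l : List (String × String)) (d : PySem.Dict String Int) :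
    (l.foldl pvStepA d).keys = d.keys := by
  induction l generalizing d with
  | nil => rfl
  | cons p l ih => simp [List.foldl_cons, ih, keys_stepA]

lemma getD_stepA (d : PySem.Dict String Int) (p : String × String) (k : String)
    (h : d.contains k = true) :
    (pvStepA d p).getD k 0 = d.getD k 0 + (([p.1, PySem.Str.join "_" [p.1, p.2]].count k : Int)) := by
  unfold pvStepA
  rw [getD_guard _ _ _ (by rw [contains_guard]; exact h), getD_guard _ _ _ h]
  simp only [List.count_cons, List.count_nil, beq_iff_eq]
  push_cast
  split_ifs <;> ring

lemma getD_Aloop (l : List (String × String)) (d : PySem.Dict String Int) (k : String)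
    (h : d.contains k = true) :
    (l.foldl pvStepA d).getD k 0 = d.getD k 0 + ((pvEvents l).count k : Int) := by
  induction l generalizing d with
  | nil => simp [pvEvents]
  | cons p l ih =>
    rw [List.foldl_cons, ih _ (by rw [contains_stepA]; exact h), getD_stepA d p k h]
    have : pvEvents (p :: l) = [p.1, PySem.Str.join "_" [p.1, p.2]] ++ pvEvents l := by
      simp [pvEvents]
    rw [this, List.count_append]
    push_cast
    ring

-- the joined key never equals the head word (it is strictly longer)
lemma pvJoinEq (a b : String) : PySem.Str.join "_" [a, b] = a ++ "_" ++ b := by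
  apply String.toList_inj.mp
  simp [PySem.Str.toList_join, PySem.Chars.join, String.toList_append, List.intercalate]

lemma pvAppNe (s t : String) : s ++ "_" ++ t ≠ s := by
  intro h
  have := congrArg (fun x => x.toList.length) h
  simp [String.toList_append] at this

-- the event count splits into B's two filter lengths
lemma events_count (l : List (String × String)) (k : String) :
    ((pvEvents l).count k : Int)
      = ((l.filter (fun p => p.1 == k)).length : Int)
        + ((l.filter (fun p => p.1 ++ "_" ++ p.2 == k)).length : Int) := by
  induction l with
  | nil => simp [pvEvents]
  | cons p l ih =>
    have hevt : pvEvents (p :: l) = [p.1, PySem.Str.join "_" [p.1, p.2]] ++ pvEvents l := by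
      simp [pvEvents]
    rw [hevt, List.count_append, pvJoinEq]
    by_cases h1 : p.1 = k
    · subst h1
      simp only [List.count_cons, List.count_nil, List.filter_cons, beq_iff_eq,
        if_neg (pvAppNe p.1 p.2), beq_self_eq_true, if_true]
      push_cast [ih, List.length_cons]
      ring
    · by_cases h2 : p.1 ++ "_" ++ p.2 = k
      · simp only [List.count_cons, List.count_nil, List.filter_cons, beq_iff_eq,
          if_neg h1, if_pos h2]
        push_cast [ih, List.length_cons]
        ring
      · simp only [List.count_cons, List.count_nil, List.filter_cons, beq_iff_eq,
          if_neg h1, if_neg h2]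
        push_cast [ih, List.length_cons]
        ring

-- projection pass: get? of a foldl of inserts with a value depending only on the key
lemma get?_foldl_insert_fn (g : String → Int) (l : List String) (d : PySem.Dict String Int)
    (k : String) :
    (l.foldl (fun d t => d.insert t (g t)) d).get? k
      = if k ∈ l then some (g k) else d.get? k := by
  induction l generalizing d with
  | nil => simp
  | cons t l ih =>
    rw [List.foldl_cons, ih]
    by_cases h2 : k = t
    · subst h2; by_cases h1 : k ∈ l <;> simp [h1]
    · by_cases h1 : k ∈ l <;> simp [h1, h2, PySem.Dict.get?_insert]

-- the core dict equality: A's updated dict = B's per-term-scan dict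
lemma counts_eq (bigrams : List (String × String)) (to_count : List String) :
    bigrams.foldl pvStepA (to_count.foldl (fun d term => d.insert term 0) PySem.Dict.empty)
    = to_count.foldl
        (fun d term => d.insert term
          (((bigrams.filter (fun p => p.1 == term)).length : Int)
            + ((bigrams.filter (fun p => p.1 ++ "_" ++ p.2 == term)).length : Int)))
        PySem.Dict.empty := by
  apply PySem.Dict.ext
  have hndA : (bigrams.foldl pvStepA
      (to_count.foldl (fun d term => d.insert term 0) PySem.Dict.empty)).keys.Nodup := by
    rw [keys_Aloop]
    exact PySem.Dict.nodup_keys_foldl_insert _ _ _ (by simp [PySem.Dict.keys_empty])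
  have hndB : ((to_count.foldl
      (fun d term => d.insert term
        (((bigrams.filter (fun p => p.1 == term)).length : Int)
          + ((bigrams.filter (fun p => p.1 ++ "_" ++ p.2 == term)).length : Int)))
      PySem.Dict.empty)).keys.Nodup :=
    PySem.Dict.nodup_keys_foldl_insert _ _ _ (by simp [PySem.Dict.keys_empty])
  rw [PySem.Dict.items_eq_map_keys _ hndA 0, PySem.Dict.items_eq_map_keys _ hndB 0]
  have hkeys : (bigrams.foldl pvStepA
        (to_count.foldl (fun d term => d.insert term 0) PySem.Dict.empty)).keys
      = ((to_count.foldl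
        (fun d term => d.insert term
          (((bigrams.filter (fun p => p.1 == term)).length : Int)
            + ((bigrams.filter (fun p => p.1 ++ "_" ++ p.2 == term)).length : Int)))
        PySem.Dict.empty)).keys := by
    rw [keys_Aloop, PySem.Dict.keys_foldl_insert, PySem.Dict.keys_foldl_insert]
  rw [← hkeys]
  apply List.map_congr_left
  intro k hk
  have hmem : k ∈ to_count := by
    rw [keys_Aloop, PySem.Dict.keys_foldl_insert, PySem.Dict.keys_empty] at hk
    simp only [PySem.Set.update] at hk
    rw [← PySem.Set.ofList_eq_foldl] at hk
    exact (PySem.Set.mem_ofList _ _).mp hk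
  have hinit : (to_count.foldl (fun d term => d.insert term (0 : Int)) PySem.Dict.empty).get? k
      = some 0 := by
    rw [get?_foldl_insert_fn (fun _ => (0 : Int))]
    simp [hmem]
  have hcont : (to_count.foldl (fun d term => d.insert term (0 : Int)) PySem.Dict.empty).contains k
      = true := by
    rw [PySem.Dict.contains_eq_isSome_get?, hinit]; rfl
  congr 1
  rw [getD_Aloop _ _ _ hcont, PySem.Dict.getD_eq_get?_getD, hinit,
    PySem.Dict.getD_eq_get?_getD,
    get?_foldl_insert_fn (fun t =>
      ((bigrams.filter (fun p => p.1 == t)).length : Int)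
        + ((bigrams.filter (fun p => p.1 ++ "_" ++ p.2 == t)).length : Int)),
    if_pos hmem, events_count]
  simp

-- ===== VERDICT (by name: the statement is the Claim_ definition above) =====
theorem count_terms_spec : Claim_equal_count_terms := by
  intro bigrams to_count _
  show count_terms bigrams to_count = count_terms_alt bigrams to_count
  show ((bigrams.foldl pvStepA
      (to_count.foldl (fun d term => d.insert term 0) PySem.Dict.empty)).insert "len"
        (bigrams.length : Int)).items
    = ((to_count.foldl
        (fun d term => d.insert term
          (((bigrams.filter (fun p => p.1 == term)).length : Int)
            + ((bigrams.filter (fun p => p.1 ++ "_" ++ p.2 == term)).length : Int)))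
        PySem.Dict.empty).insert "len" (bigrams.length : Int)).items
  rw [counts_eq]
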